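-- pv_equiv track=rewrite | github.com/jmxx219/PS-python | programmers/Level2/거리두기 확인하기.py | direction2
-- ===== SOURCE A (Python) =====
-- dy = [-1, 1, 0, 0]
--
-- dx = [0, 0, 1, -1]
--
-- def isRange(y, x):
--     return 0 <= x < 5 and 0 <= y < 5
--
-- def direction2(y, x,  place): # 2중 for문: 4방향씩 탐색하면서, P가 탐색되면 False를 리턴한다.
--     for i in range(4):
--         newY1 = y + dy[i]
--         newX1 = x + dx[i]
--         if isRange(newY1, newX1):
--             if place[newY1][newX1] == "X":
--                 continue
--             if place[newY1][newX1] == "P":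
--                 return False
--             for j in range(4):
--                 newY2 = newY1 + dy[j]
--                 newX2 = newX1 + dx[j]
--                 if isRange(newY2, newX2) and not (y == newY2 and x == newX2):
--                     if place[newY2][newX2] == "X":
--                         continue
--                     if place[newY2][newX2] == "P":
--                         return False
--     return True
-- ===== SOURCE B (Python) =====
-- def direction2(y, x, place):
--     def in_range(r, c):
--         return 0 <= r < 5 and 0 <= c < 5
--
--     # phase 1: any in-range orthogonal neighbour holding "P" violates distancing
--     for r, c in ((y - 1, x), (y + 1, x), (y, x - 1), (y, x + 1)):
--         if in_range(r, c) and place[r][c] == "P":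
--             return False
--
--     # phase 2: distance-2 targets, each with its shared intermediate cell(s)
--     targets = (
--         ((y - 2, x), ((y - 1, x),)),
--         ((y + 2, x), ((y + 1, x),)),
--         ((y, x - 2), ((y, x - 1),)),
--         ((y, x + 2), ((y, x + 1),)),
--         ((y - 1, x - 1), ((y - 1, x), (y, x - 1))),
--         ((y - 1, x + 1), ((y - 1, x), (y, x + 1))),
--         ((y + 1, x - 1), ((y + 1, x), (y, x - 1))),
--         ((y + 1, x + 1), ((y + 1, x), (y, x + 1))),
--     )
--     for (r, c), mids in targets:
--         if in_range(r, c) and place[r][c] == "P":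
--             if any(in_range(mr, mc) and place[mr][mc] != "X" for mr, mc in mids):
--                 return False
--     return True
-- ===== Notes on version B (the rewrite author's own statement) =====
-- stated objective: alternative
-- what changed: Replaces A's two-level directional expansion (4 first steps, each re-expanded in 4 directions with an origin-exclusion test) by a flat scan: first the four orthogonal neighbours for 'P', then the eight distance-2 target cells, each checked for 'P' together with a passability test of its one or two shared intermediate cells.
-- outside the precondition, e.g. on direction2(0, 0, ['XX', 'XX']): A returns True, B raises IndexError
import Mathlib
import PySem

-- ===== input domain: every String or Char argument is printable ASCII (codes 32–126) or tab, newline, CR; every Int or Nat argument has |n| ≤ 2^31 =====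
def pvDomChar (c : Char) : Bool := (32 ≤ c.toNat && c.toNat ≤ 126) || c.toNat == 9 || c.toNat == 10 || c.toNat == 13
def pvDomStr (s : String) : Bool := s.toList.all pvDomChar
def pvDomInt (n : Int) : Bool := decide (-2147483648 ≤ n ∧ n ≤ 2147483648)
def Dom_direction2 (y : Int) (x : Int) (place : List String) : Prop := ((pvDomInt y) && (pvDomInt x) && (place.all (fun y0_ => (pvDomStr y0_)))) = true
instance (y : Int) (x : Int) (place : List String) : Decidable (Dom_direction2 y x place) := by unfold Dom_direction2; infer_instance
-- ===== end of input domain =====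

-- B replaces A's two-level directional expansion by a flat scan of the four orthogonal
-- neighbours plus the eight distance-2 targets with their shared intermediate cells
-- (alternative decomposition, same cost); Pre_ excludes inputs where an in-range probed
-- cell is missing from `place` (Python IndexError on A or B).


-- ===== PORT A =====
def pvDyA : List Int := [-1, 1, 0, 0]
def pvDxA : List Int := [0, 0, 1, -1]

def isRange (y : Int) (x : Int) : Bool :=
  decide (0 ≤ x) && decide (x < 5) && decide (0 ≤ y) && decide (y < 5)

-- place[r][c] (none exactly where Python raises IndexError; excluded by Pre_)
def pvAt (place : List String) (r : Int) (c : Int) : Option Char :=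
  (PySem.List.pyGet? place r).bind fun row => PySem.Str.pyGet? row c

def direction2 (y : Int) (x : Int) (place : List String) : Bool :=
  !(([0, 1, 2, 3] : List Nat).any fun i =>
    let newY1 := y + pvDyA.getD i 0
    let newX1 := x + pvDxA.getD i 0
    if isRange newY1 newX1 then
      if pvAt place newY1 newX1 == some 'X' then false
      else if pvAt place newY1 newX1 == some 'P' then true
      else
        ([0, 1, 2, 3] : List Nat).any fun j =>
          let newY2 := newY1 + pvDyA.getD j 0
          let newX2 := newX1 + pvDxA.getD j 0
          if isRange newY2 newX2 && !(y == newY2 && x == newX2) then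
            if pvAt place newY2 newX2 == some 'X' then false
            else pvAt place newY2 newX2 == some 'P'
          else false
    else false)

-- ===== PORT B =====
def pvInRange (r : Int) (c : Int) : Bool :=
  decide (0 ≤ r) && decide (r < 5) && decide (0 ≤ c) && decide (c < 5)

def pvOrth (y : Int) (x : Int) : List (Int × Int) :=
  [(y - 1, x), (y + 1, x), (y, x - 1), (y, x + 1)]

def pvTargets (y : Int) (x : Int) : List ((Int × Int) × List (Int × Int)) :=
  [ ((y - 2, x), [(y - 1, x)]),
    ((y + 2, x), [(y + 1, x)]),
    ((y, x - 2), [(y, x - 1)]),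
    ((y, x + 2), [(y, x + 1)]),
    ((y - 1, x - 1), [(y - 1, x), (y, x - 1)]),
    ((y - 1, x + 1), [(y - 1, x), (y, x + 1)]),
    ((y + 1, x - 1), [(y + 1, x), (y, x - 1)]),
    ((y + 1, x + 1), [(y + 1, x), (y, x + 1)]) ]

def direction2_alt (y : Int) (x : Int) (place : List String) : Bool :=
  if (pvOrth y x).any (fun rc =>
       pvInRange rc.1 rc.2 && (pvAt place rc.1 rc.2 == some 'P')) then false
  else if (pvTargets y x).any (fun tm =>
       pvInRange tm.1.1 tm.1.2 && (pvAt place tm.1.1 tm.1.2 == some 'P') &&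
       tm.2.any (fun m => pvInRange m.1 m.2 && !(pvAt place m.1 m.2 == some 'X'))) then false
  else true

-- ===== PRECONDITION & SPEC =====
def pvProbes : List (Int × Int) :=
  [(-1, 0), (1, 0), (0, -1), (0, 1),
   (-2, 0), (2, 0), (0, -2), (0, 2),
   (-1, -1), (-1, 1), (1, -1), (1, 1)]

-- Pre_ requires every in-range cell at Manhattan distance 1 or 2 from (y,x) to exist in
-- `place` (rows present and long enough): outside it A (lazily) or B raises IndexError.
-- It is slightly stronger than "A returns": A can return before probing a missing cell.
def Pre_direction2 (y : Int) (x : Int) (place : List String) : Prop :=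
  ∀ d ∈ pvProbes, isRange (y + d.1) (x + d.2) = true → (pvAt place (y + d.1) (x + d.2)).isSome = true

instance (y : Int) (x : Int) (place : List String) : Decidable (Pre_direction2 y x place) := by
  unfold Pre_direction2; infer_instance

def pvWitness_direction2 : Int × Int × List String :=
  (2, 2, ["OOOOO", "OOOOO", "OOOOO", "OOOOO", "OOOOO"])

def Spec_direction2 (y : Int) (x : Int) (place : List String) (out : Bool) : Prop := out = direction2_alt y x place
instance (y : Int) (x : Int) (place : List String) (out : Bool) : Decidable (Spec_direction2 y x place out) := by unfold Spec_direction2; infer_instance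

-- ===== CLAIM (what is proved, stated in full; the proofs are below) =====
def Claim_equal_direction2 : Prop := ∀ (y : Int) (x : Int) (place : List String), Dom_direction2 y x place → Pre_direction2 y x place → Spec_direction2 y x place (direction2 y x place)

-- ===== LEMMAS AND PROOFS =====


theorem pv_beq_self_int (y : Int) : (y == y) = true := by simp

theorem pv_beq_shift (y c : Int) : (y == c + y) = (c == 0) := by
  by_cases h : c = 0
  · subst h; simp
  · have hne : y ≠ c + y := by omega
    have h1 : (y == c + y) = false := by simp [hne]
    have h2 : (c == (0 : Int)) = false := by simp [h]
    rw [h1, h2]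

theorem pv_guard (b t : Bool) : (if b = true then t else false) = (b && t) := by
  cases b <;> simp

theorem pv_bnot2 (c d : Bool) :
    (if c = true then false else if d = true then false else true) = !(c || d) := by
  cases c <;> cases d <;> rfl

theorem pv_inRange_eq (a b : Int) : pvInRange a b = isRange a b := by
  simp [pvInRange, isRange, Bool.and_comm, Bool.and_left_comm, Bool.and_assoc]

theorem pv_m2 : (((-2 : Int)) == (0 : Int)) = false := rfl
theorem pv_m1 : (((-1 : Int)) == (0 : Int)) = false := rfl
theorem pv_p1 : (((1 : Int)) == (0 : Int)) = false := rfl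
theorem pv_p2 : (((2 : Int)) == (0 : Int)) = false := rfl
theorem pv_if_false (t : Bool) : (if false = true then t else false) = false := rfl

-- the inner j-step cell test of A: an 'X' cell is skipped, otherwise trigger iff 'P'
theorem pv_innerCell (c : Option Char) :
    (if c == some 'X' then false else (c == some 'P')) = (c == some 'P') := by
  by_cases h : c = some 'X' <;> simp [h]

-- the outer if-chain of A, in disjunctive form
theorem pv_outerCell (c : Option Char) (t : Bool) :
    (if c == some 'X' then false else if c == some 'P' then true else t)
      = ((c == some 'P') || (!(c == some 'X') && !(c == some 'P') && t)) := by
  by_cases h1 : c = some 'X'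
  · simp [h1]
  · by_cases h2 : c = some 'P'
    · simp [h2]
    · have hx : (c == some 'X') = false := by simp [h1]
      have hp : (c == some 'P') = false := by simp [h2]
      simp [hx, hp]

-- absorption: once a 'P' neighbour already triggers, the ¬'P' guard on the
-- intermediate cell is redundant
theorem pv_absorb (p xb t : Bool) : (p || (!xb && !p && t)) = (p || (!xb && t)) := by
  cases p <;> cases xb <;> cases t <;> rfl

set_option maxHeartbeats 4000000 in
theorem pv_eq_all (y : Int) (x : Int) (place : List String) :
    direction2 y x place = direction2_alt y x place := by
  simp only [direction2, direction2_alt, pvOrth, pvTargets, pvDyA, pvDxA,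
    List.any_cons, List.any_nil, List.getD, List.getElem?_cons_zero, List.getElem?_cons_succ,
    Option.getD_some]
  ring_nf
  simp only [pv_beq_shift, pv_beq_self_int, pv_m2, pv_m1, pv_p1, pv_p2, pv_inRange_eq,
    Bool.not_false, Bool.not_true, Bool.and_true, Bool.and_false,
    pv_if_false, Bool.or_false, pv_bnot2]
  simp only [pv_innerCell, pv_guard, pv_outerCell, pv_absorb]
  simp only [Bool.and_or_distrib_left]
  simp only [Bool.and_false, Bool.false_or]
  generalize (isRange (-1 + y) x) = r0
  generalize (pvAt place (-1 + y) x == some 'P') = p0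
  generalize (pvAt place (-1 + y) x == some 'X') = q0
  generalize (isRange (1 + y) x) = r1
  generalize (pvAt place (1 + y) x == some 'P') = p1
  generalize (pvAt place (1 + y) x == some 'X') = q1
  generalize (isRange y (-1 + x)) = r2
  generalize (pvAt place y (-1 + x) == some 'P') = p2
  generalize (pvAt place y (-1 + x) == some 'X') = q2
  generalize (isRange y (1 + x)) = r3
  generalize (pvAt place y (1 + x) == some 'P') = p3
  generalize (pvAt place y (1 + x) == some 'X') = q3
  generalize (isRange (-2 + y) x) = r4
  generalize (pvAt place (-2 + y) x == some 'P') = p4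
  generalize (isRange (2 + y) x) = r5
  generalize (pvAt place (2 + y) x == some 'P') = p5
  generalize (isRange y (-2 + x)) = r6
  generalize (pvAt place y (-2 + x) == some 'P') = p6
  generalize (isRange y (2 + x)) = r7
  generalize (pvAt place y (2 + x) == some 'P') = p7
  generalize (isRange (-1 + y) (-1 + x)) = r8
  generalize (pvAt place (-1 + y) (-1 + x) == some 'P') = p8
  generalize (isRange (-1 + y) (1 + x)) = r9
  generalize (pvAt place (-1 + y) (1 + x) == some 'P') = p9
  generalize (isRange (1 + y) (-1 + x)) = r10
  generalize (pvAt place (1 + y) (-1 + x) == some 'P') = p10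
  generalize (isRange (1 + y) (1 + x)) = r11
  generalize (pvAt place (1 + y) (1 + x) == some 'P') = p11
  simp only [Bool.or_comm, Bool.or_left_comm, Bool.and_assoc, Bool.and_comm,
    Bool.and_left_comm]

-- ===== VERDICT (by name: the statement is the Claim_ definition above) =====
theorem direction2_spec : Claim_equal_direction2 := by
  intro y x place _ _
  unfold Spec_direction2
  exact pv_eq_all y x place
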